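-- pv_equiv track=rewrite | github.com/ritwik-basak/CodeSentinel2 | core/embedder.py | _find_class_lines
-- ===== SOURCE A (Python) =====
-- def _find_class_lines(lines: list[str], classes: list[str], lang: str) -> dict[str, int]:
--     """
--     Scan raw source lines to find the 1-indexed line where each class is defined.
--     Uses the first non-comment line containing ``class <ClassName>``.
--     Falls back to line 1 for any class that cannot be located.
--     """
--     result: dict[str, int] = {}
--     for name in classes:
--         pattern = f"class {name}"
--         for i, line in enumerate(lines, start=1):
--             stripped = line.lstrip()
--             # Skip comment lines
--             if lang == "python" and stripped.startswith("#"):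
--                 continue
--             if lang in ("javascript", "typescript") and stripped.startswith("//"):
--                 continue
--             if pattern in line:
--                 result[name] = i
--                 break
--         if name not in result:
--             result[name] = 1  # fallback — class not found in source scan
--     return result
-- ===== SOURCE B (Python) =====
-- def _find_class_lines(lines: list[str], classes: list[str], lang: str) -> dict[str, int]:
--     """Single pass over the source lines: each non-comment line is tested only
--     against the classes not yet located, with an early exit once all are found."""
--     remaining = list(dict.fromkeys(classes))
--     found: dict[str, int] = {}
--     for i, line in enumerate(lines, start=1):
--         if not remaining:
--             break
--         stripped = line.lstrip()
--         if lang == "python" and stripped.startswith("#"):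
--             continue
--         if lang in ("javascript", "typescript") and stripped.startswith("//"):
--             continue
--         still = []
--         for name in remaining:
--             if f"class {name}" in line:
--                 found[name] = i
--             else:
--                 still.append(name)
--         remaining = still
--     return {name: found.get(name, 1) for name in dict.fromkeys(classes)}
-- ===== Notes on version B (the rewrite author's own statement) =====
-- stated objective: alternative
-- what changed: A scans the whole file once per class; B makes a single pass over the lines, testing each non-comment line only against the classes not yet located (with an early exit once all are found) and then reads the results off in first-occurrence class order; intended as faster (measured ~2.4x at the largest size both finished, but unconfirmed at the top size, so not claimed).
import Mathlib
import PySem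

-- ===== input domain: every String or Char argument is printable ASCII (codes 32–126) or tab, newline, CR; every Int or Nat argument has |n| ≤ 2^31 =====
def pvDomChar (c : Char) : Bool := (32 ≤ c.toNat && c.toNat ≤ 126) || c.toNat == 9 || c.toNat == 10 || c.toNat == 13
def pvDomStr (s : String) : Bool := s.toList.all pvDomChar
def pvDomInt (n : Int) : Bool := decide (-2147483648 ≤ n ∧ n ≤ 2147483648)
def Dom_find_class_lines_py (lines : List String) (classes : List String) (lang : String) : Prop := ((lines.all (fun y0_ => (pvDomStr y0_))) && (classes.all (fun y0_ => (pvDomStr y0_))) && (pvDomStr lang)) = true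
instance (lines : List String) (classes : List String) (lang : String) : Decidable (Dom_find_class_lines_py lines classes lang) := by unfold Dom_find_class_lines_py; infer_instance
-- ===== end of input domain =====

-- B replaces A's one-full-scan-of-the-file-per-class by a single pass over the lines that
-- tests each non-comment line only against the classes not yet located (early exit when all
-- are found); return values proved equal, A performs no observable mutation.

-- ===== PORT A =====
-- inner `for i, line in enumerate(lines, start=1): … break` loop of A; `some i` = the break
def pvScanA (lines : List String) (i : Int) (pattern : String) (lang : String) : Option Int :=
  match lines with
  | [] => none
  | line :: rest =>
    let stripped := PySem.Str.lstrip line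
    if lang == "python" && PySem.Str.startswith stripped "#" then
      pvScanA rest (i + 1) pattern lang
    else if (lang == "javascript" || lang == "typescript") && PySem.Str.startswith stripped "//" then
      pvScanA rest (i + 1) pattern lang
    else if PySem.Str.isIn pattern line then some i
    else pvScanA rest (i + 1) pattern lang

-- A's `if name not in result: result[name] = 1` fallback after the scan loop
def pvFallbackA (name : String) (result' : PySem.Dict String Int) : PySem.Dict String Int :=
  if result'.contains name then result' else result'.insert name 1

-- body of A's `for name in classes` loop: the scan (pattern = f"class {name}"), then the fallback
def pvStepA (lines : List String) (lang : String) (result : PySem.Dict String Int) (name : String) : PySem.Dict String Int :=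
  pvFallbackA name (match pvScanA lines 1 ("class " ++ name) lang with
    | some i => result.insert name i
    | none => result)

def find_class_lines_py (lines : List String) (classes : List String) (lang : String) : List (String × Int) :=
  (classes.foldl (pvStepA lines lang) PySem.Dict.empty).items

-- ===== PORT B =====
-- B's single `for i, line in enumerate(lines, start=1)` loop with the `if not remaining: break`
def pvLoopB (lines : List String) (i : Int) (remaining : List String) (found : PySem.Dict String Int) (lang : String) : PySem.Dict String Int :=
  match lines with
  | [] => found
  | line :: rest =>
    if remaining.isEmpty then found
    else
      let stripped := PySem.Str.lstrip line
      if lang == "python" && PySem.Str.startswith stripped "#" then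
        pvLoopB rest (i + 1) remaining found lang
      else if (lang == "javascript" || lang == "typescript") && PySem.Str.startswith stripped "//" then
        pvLoopB rest (i + 1) remaining found lang
      else
        let fs := remaining.foldl
          (fun (p : PySem.Dict String Int × List String) name =>
            if PySem.Str.isIn ("class " ++ name) line then (p.1.insert name i, p.2)
            else (p.1, p.2 ++ [name]))
          (found, ([] : List String))
        pvLoopB rest (i + 1) fs.2 fs.1 lang

def find_class_lines_py_alt (lines : List String) (classes : List String) (lang : String) : List (String × Int) :=
  let found := pvLoopB lines 1 (PySem.List.dedup classes) PySem.Dict.empty lang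
  -- the final dict comprehension runs over dict.fromkeys(classes) = dedup classes, whose keys
  -- are distinct, so the resulting dict is exactly this association list in that order
  (PySem.List.dedup classes).map (fun name => (name, found.getD name 1))

-- ===== PRECONDITION & SPEC =====
def Spec_find_class_lines_py (lines : List String) (classes : List String) (lang : String) (out : List (String × Int)) : Prop := out = find_class_lines_py_alt lines classes lang
instance (lines : List String) (classes : List String) (lang : String) (out : List (String × Int)) : Decidable (Spec_find_class_lines_py lines classes lang out) := by unfold Spec_find_class_lines_py; infer_instance

-- ===== CLAIM (what is proved, stated in full; the proofs are below) =====
def Claim_equal_find_class_lines_py : Prop := ∀ (lines : List String) (classes : List String) (lang : String), Dom_find_class_lines_py lines classes lang → Spec_find_class_lines_py lines classes lang (find_class_lines_py lines classes lang)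

-- ===== LEMMAS AND PROOFS =====

-- first-hit line of class `n` (else 1), the common reference value
def pvFA (lines : List String) (lang : String) (n : String) : Int :=
  (pvScanA lines 1 ("class " ++ n) lang).getD 1

-- A side: one step of A's class loop on an invariant dict
lemma pvStepA_inv (lines : List String) (lang : String) (pre : List String) (c : String) :
    pvStepA lines lang (PySem.Dict.mk (pre.map (fun n => (n, pvFA lines lang n)))) c =
      PySem.Dict.mk ((PySem.Set.add pre c).map (fun n => (n, pvFA lines lang n))) := by
  have hkey : ∀ x : String, (PySem.Dict.mk (pre.map (fun n => (n, pvFA lines lang n)))).contains x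
      = true ↔ x ∈ pre := by
    intro x
    simp [PySem.Dict.contains, List.any_map, Function.comp, List.any_eq_true]
  by_cases hc : c ∈ pre
  · have hadd : PySem.Set.add pre c = pre := by
      simp [PySem.Set.add, PySem.Set.contains, hc]
    rw [hadd]
    unfold pvStepA pvFallbackA
    cases hs : pvScanA lines 1 ("class " ++ c) lang with
    | none =>
        simp only []
        rw [if_pos ((hkey c).mpr hc)]
    | some i =>
        have hfc : pvFA lines lang c = i := by simp [pvFA, hs]
        simp only []
        have hins : (PySem.Dict.mk (pre.map (fun n => (n, pvFA lines lang n)))).insert c i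
            = PySem.Dict.mk (pre.map (fun n => (n, pvFA lines lang n))) := by
          unfold PySem.Dict.insert
          rw [if_pos ((hkey c).mpr hc)]
          congr 1
          simp only [List.map_map]
          apply List.map_congr_left
          intro a _
          by_cases hac : a = c
          · subst hac; simp [Function.comp, hfc]
          · simp [Function.comp, beq_eq_false_iff_ne.mpr hac]
        rw [hins, if_pos ((hkey c).mpr hc)]
  · have hadd : PySem.Set.add pre c = pre ++ [c] := by
      simp [PySem.Set.add, PySem.Set.contains, hc]
    rw [hadd]
    unfold pvStepA pvFallbackA
    have hnc : ¬ (PySem.Dict.mk (pre.map (fun n => (n, pvFA lines lang n)))).contains c = true := by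
      rw [hkey]; exact hc
    cases hs : pvScanA lines 1 ("class " ++ c) lang with
    | none =>
        have hfc : pvFA lines lang c = 1 := by simp [pvFA, hs]
        simp only []
        rw [if_neg hnc]
        unfold PySem.Dict.insert
        rw [if_neg hnc]
        congr 1
        simp [hfc]
    | some i =>
        have hfc : pvFA lines lang c = i := by simp [pvFA, hs]
        simp only []
        have hins : (PySem.Dict.mk (pre.map (fun n => (n, pvFA lines lang n)))).insert c i
            = PySem.Dict.mk ((pre ++ [c]).map (fun n => (n, pvFA lines lang n))) := by
          unfold PySem.Dict.insert
          rw [if_neg hnc]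
          congr 1
          simp [hfc]
        rw [hins, if_pos]
        unfold PySem.Dict.contains
        simp

lemma pvFoldA (lines : List String) (lang : String) (cs : List String) (pre : List String) :
    cs.foldl (pvStepA lines lang) (PySem.Dict.mk (pre.map (fun n => (n, pvFA lines lang n)))) =
      PySem.Dict.mk ((PySem.Set.update pre cs).map (fun n => (n, pvFA lines lang n))) := by
  induction cs generalizing pre with
  | nil => rfl
  | cons c cs ih =>
      simp only [List.foldl_cons, pvStepA_inv]
      exact ih (PySem.Set.add pre c)

-- B side: the per-line fold over `remaining` (generic in the match test), getD view
lemma pvFold1_getD (test : String → Bool) (i : Int) (l : List String)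
    (found : PySem.Dict String Int) (acc : List String) (n : String) (d0 : Int) :
    ((l.foldl (fun (p : PySem.Dict String Int × List String) name =>
        if test name then (p.1.insert name i, p.2)
        else (p.1, p.2 ++ [name])) (found, acc)).1).getD n d0 =
      if n ∈ l ∧ test n then i else found.getD n d0 := by
  induction l generalizing found acc with
  | nil => simp
  | cons a l ih =>
      simp only [List.foldl_cons]
      by_cases ha : test a = true
      · simp only [ha, if_true]
        rw [ih, PySem.Dict.getD_insert]
        by_cases hn : n = a
        · subst hn; simp [ha]
        · simp [List.mem_cons, hn]
      · simp only [ha]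
        rw [ih]
        by_cases hn : n = a
        · subst hn; simp [ha]
        · simp [List.mem_cons, hn]

lemma pvFold1_contains (test : String → Bool) (i : Int) (l : List String)
    (found : PySem.Dict String Int) (acc : List String) (n : String) :
    ((l.foldl (fun (p : PySem.Dict String Int × List String) name =>
        if test name then (p.1.insert name i, p.2)
        else (p.1, p.2 ++ [name])) (found, acc)).1).contains n =
      (decide (n ∈ l ∧ test n) || found.contains n) := by
  induction l generalizing found acc with
  | nil => simp
  | cons a l ih =>
      simp only [List.foldl_cons]
      by_cases ha : test a = true
      · simp only [ha, if_true]
        rw [ih, PySem.Dict.contains_insert]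
        by_cases hn : n = a
        · subst hn; simp [ha]
        · simp [List.mem_cons, hn, beq_eq_false_iff_ne.mpr hn]
      · simp only [ha]
        rw [ih]
        by_cases hn : n = a
        · subst hn; simp [ha]
        · simp [List.mem_cons, hn]

lemma pvFold2 (test : String → Bool) (i : Int) (l : List String)
    (found : PySem.Dict String Int) (acc : List String) :
    (l.foldl (fun (p : PySem.Dict String Int × List String) name =>
        if test name then (p.1.insert name i, p.2)
        else (p.1, p.2 ++ [name])) (found, acc)).2 =
      acc ++ l.filter (fun name => !test name) := by
  induction l generalizing found acc with
  | nil => simp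
  | cons a l ih =>
      simp only [List.foldl_cons, List.filter_cons]
      by_cases ha : test a = true
      · simp [ha, ih]
      · simp only [ha, Bool.not_false]
        rw [ih]
        simp [ha]

lemma pvLoopB_getD (lines : List String) (i : Int) (remaining : List String)
    (found : PySem.Dict String Int) (lang : String) (n : String)
    (hc : ∀ m ∈ remaining, found.contains m = false) :
    (pvLoopB lines i remaining found lang).getD n 1 =
      if n ∈ remaining then (pvScanA lines i ("class " ++ n) lang).getD 1
      else found.getD n 1 := by
  induction lines generalizing i remaining found with
  | nil =>
      by_cases hmem : n ∈ remaining
      · simp [pvLoopB, pvScanA, hmem, PySem.Dict.getD_of_not_contains found 1 (hc n hmem)]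
      · simp [pvLoopB, hmem]
  | cons line rest ih =>
      rw [pvLoopB.eq_def, pvScanA.eq_def]
      by_cases hre : remaining.isEmpty
      · have h0 : remaining = [] := List.isEmpty_iff.mp hre
        subst h0
        simp
      · simp only [hre, Bool.false_eq_true, if_false]
        by_cases h1 : (lang == "python" && PySem.Str.startswith (PySem.Str.lstrip line) "#") = true
        · simp only [h1, if_true]
          exact ih (i + 1) remaining found hc
        · simp only [h1, Bool.false_eq_true, if_false]
          by_cases h2 : ((lang == "javascript" || lang == "typescript")
              && PySem.Str.startswith (PySem.Str.lstrip line) "//") = true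
          · simp only [h2, if_true]
            exact ih (i + 1) remaining found hc
          · simp only [h2, Bool.false_eq_true, if_false]
            rw [pvFold2]
            have hc' : ∀ m ∈ (remaining.filter
                (fun name => !PySem.Str.isIn ("class " ++ name) line)),
                ((remaining.foldl (fun (p : PySem.Dict String Int × List String) name =>
                    if PySem.Str.isIn ("class " ++ name) line then (p.1.insert name i, p.2)
                    else (p.1, p.2 ++ [name])) (found, ([] : List String))).1).contains m = false := by
              intro m hm
              obtain ⟨hm1, hm2⟩ := List.mem_filter.mp hm
              rw [pvFold1_contains]
              simp only [Bool.not_eq_true'] at hm2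
              simp only [hm2, Bool.false_eq_true, and_false, decide_false, Bool.false_or]
              exact hc m hm1
            rw [List.nil_append, ih (i + 1) _ _ hc']
            by_cases hmem : n ∈ remaining
            · by_cases ht : PySem.Str.isIn ("class " ++ n) line = true
              · have hnf : n ∉ remaining.filter
                    (fun name => !PySem.Str.isIn ("class " ++ name) line) := by
                  intro h
                  have := (List.mem_filter.mp h).2
                  rw [ht] at this
                  simp at this
                rw [if_neg hnf, if_pos hmem, pvFold1_getD, if_pos ⟨hmem, ht⟩, ht]
                simp
              · have hf : n ∈ remaining.filter
                    (fun name => !PySem.Str.isIn ("class " ++ name) line) :=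
                  List.mem_filter.mpr ⟨hmem, by simp only [Bool.not_eq_true']; simpa using ht⟩
                rw [if_pos hf, if_pos hmem]
                have ht' : PySem.Str.isIn ("class " ++ n) line = false := by simpa using ht
                rw [ht']
                simp
            · have hnf : n ∉ remaining.filter
                  (fun name => !PySem.Str.isIn ("class " ++ name) line) := by
                intro h
                exact hmem (List.mem_filter.mp h).1
              rw [if_neg hnf, if_neg hmem, pvFold1_getD]
              simp [hmem]

-- ===== VERDICT (by name: the statement is the Claim_ definition above) =====
theorem find_class_lines_py_spec : Claim_equal_find_class_lines_py := by
  intro lines classes lang _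
  show find_class_lines_py lines classes lang = find_class_lines_py_alt lines classes lang
  unfold find_class_lines_py find_class_lines_py_alt
  have hA : classes.foldl (pvStepA lines lang) PySem.Dict.empty =
      PySem.Dict.mk ((PySem.List.dedup classes).map (fun n => (n, pvFA lines lang n))) := by
    have := pvFoldA lines lang classes []
    simpa [PySem.Dict.empty, PySem.Set.update, PySem.Set.ofList] using this
  rw [hA]
  apply List.map_congr_left
  intro n hn
  rw [pvLoopB_getD lines 1 (PySem.List.dedup classes) PySem.Dict.empty lang n
        (by intro m _; rfl)]
  have hnc : n ∈ classes := by simpa using hn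
  simp [pvFA, hnc]
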